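-- pv_equiv track=rewrite | github.com/jiahaoxiang2000/sbox-bgc | gec_solver/utils.py | validate_sbox
-- ===== SOURCE A (Python) =====
-- from typing import List, Optional
--
-- def validate_sbox(sbox: List[int], bit_num: int) -> bool:
--     """
--     Validate S-box structure and values.
--
--     Args:
--         sbox: S-box values
--         bit_num: Number of bits
--
--     Returns:
--         True if valid, False otherwise
--     """
--     expected_size = 2**bit_num
--     if len(sbox) != expected_size:
--         return False
--
--     # Check if all values are within valid range
--     max_val = expected_size - 1
--     for val in sbox:
--         if not (0 <= val <= max_val):
--             return False
--
--     # Check if S-box is a permutation (all values unique)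
--     if len(set(sbox)) != len(sbox):
--         return False
--
--     return True
-- ===== SOURCE B (Python) =====
-- def validate_sbox(sbox, bit_num):
--     """Validate S-box size, value range, permutation property (sort-and-scan)."""
--     if len(sbox) != 2 ** bit_num:
--         return False
--     s = sorted(sbox)
--     if not s:
--         return True
--     if s[0] < 0 or s[-1] > len(s) - 1:
--         return False
--     for i in range(len(s) - 1):
--         if s[i] == s[i + 1]:
--             return False
--     return True
-- ===== Notes on version B (the rewrite author's own statement) =====
-- stated objective: alternative
-- what changed: Replaces A's per-element range loop and set-based uniqueness count with one sorted copy of the S-box: the range check becomes two endpoint comparisons (min = s[0], max = s[-1]) and the permutation check a single adjacent-equality scan.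
import Mathlib
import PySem

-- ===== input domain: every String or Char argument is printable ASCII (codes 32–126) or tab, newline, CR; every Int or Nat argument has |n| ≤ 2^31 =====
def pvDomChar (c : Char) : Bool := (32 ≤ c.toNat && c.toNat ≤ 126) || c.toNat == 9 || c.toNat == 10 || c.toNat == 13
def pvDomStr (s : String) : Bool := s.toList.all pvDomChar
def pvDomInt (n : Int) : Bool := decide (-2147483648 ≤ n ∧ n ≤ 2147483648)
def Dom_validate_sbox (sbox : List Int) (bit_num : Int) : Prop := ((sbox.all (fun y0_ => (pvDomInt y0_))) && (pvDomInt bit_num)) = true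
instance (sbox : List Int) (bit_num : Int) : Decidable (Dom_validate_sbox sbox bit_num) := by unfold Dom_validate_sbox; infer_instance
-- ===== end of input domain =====

-- B validates the S-box via one sorted copy (endpoint range check + adjacent-duplicate scan)
-- instead of A's per-element range loop and set-size uniqueness test; same return value everywhere.


-- ===== PORT A =====
-- For bit_num < 0 Python's 2**bit_num is a float strictly between 0 and 1, so
-- `len(sbox) != expected_size` is always true and A returns False; exact on that branch.
def validate_sbox (sbox : List Int) (bit_num : Int) : Bool :=
  if bit_num < 0 then false
  else
    let expected_size : Int := 2 ^ bit_num.toNat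
    if (sbox.length : Int) != expected_size then false
    else
      let max_val : Int := expected_size - 1
      if !(sbox.all fun val => decide (0 ≤ val) && decide (val ≤ max_val)) then false
      else if (PySem.Set.ofList sbox).length != sbox.length then false
      else true

-- ===== PORT B =====
-- the adjacent-equality scan of Source B (`for i in range(len(s)-1): if s[i]==s[i+1]: return False`)
def pairsDistinct : List Int → Bool
  | [] => true
  | [_] => true
  | a :: b :: t => if a == b then false else pairsDistinct (b :: t)

-- same float remark as in port A for the bit_num < 0 branch
def validate_sbox_alt (sbox : List Int) (bit_num : Int) : Bool :=
  if bit_num < 0 then false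
  else if (sbox.length : Int) != 2 ^ bit_num.toNat then false
  else
    match PySem.List.sorted sbox (fun x => x) false with
    | [] => true
    | h :: t =>
      if h < 0 || (h :: t).getLast (by simp) > (sbox.length : Int) - 1 then false
      else pairsDistinct (h :: t)

-- ===== PRECONDITION & SPEC =====
def Spec_validate_sbox (sbox : List Int) (bit_num : Int) (out : Bool) : Prop := out = validate_sbox_alt sbox bit_num
instance (sbox : List Int) (bit_num : Int) (out : Bool) : Decidable (Spec_validate_sbox sbox bit_num out) := by unfold Spec_validate_sbox; infer_instance

-- ===== CLAIM (what is proved, stated in full; the proofs are below) =====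
def Claim_equal_validate_sbox : Prop := ∀ (sbox : List Int) (bit_num : Int), Dom_validate_sbox sbox bit_num → Spec_validate_sbox sbox bit_num (validate_sbox sbox bit_num)

-- ===== LEMMAS AND PROOFS =====

theorem pairsDistinct_of_nodup {l : List Int} (h : l.Nodup) : pairsDistinct l = true := by
  induction l with
  | nil => rfl
  | cons a t ih =>
    cases t with
    | nil => rfl
    | cons b t' =>
      have hab : a ≠ b := by
        intro hEq; exact (List.nodup_cons.1 h).1 (hEq ▸ List.mem_cons_self)
      simp only [pairsDistinct, beq_iff_eq, if_neg hab]
      exact ih (List.nodup_cons.1 h).2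

theorem pairwise_lt_of_pairsDistinct {l : List Int} (hp : l.Pairwise (· ≤ ·))
    (hd : pairsDistinct l = true) : l.Pairwise (· < ·) := by
  induction l with
  | nil => exact List.Pairwise.nil
  | cons a t ih =>
    obtain ⟨ha, hp'⟩ := List.pairwise_cons.1 hp
    cases t with
    | nil => simp
    | cons b t' =>
      simp only [pairsDistinct, beq_iff_eq] at hd
      by_cases hab : a = b
      · simp [hab] at hd
      · rw [if_neg hab] at hd
        have ihp : (b :: t').Pairwise (· < ·) := ih hp' hd
        refine List.pairwise_cons.2 ⟨?_, ihp⟩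
        have hab' : a < b := lt_of_le_of_ne (ha b List.mem_cons_self) hab
        intro c hc
        rcases List.mem_cons.1 hc with rfl | hc
        · exact hab'
        · exact lt_trans hab' ((List.pairwise_cons.1 ihp).1 c hc)

theorem length_ofList_eq_iff (xs : List Int) :
    (PySem.Set.ofList xs).length = xs.length ↔ xs.Nodup := by
  constructor
  · intro h
    have hperm : (PySem.Set.ofList xs).Perm xs.dedup := by
      refine (List.perm_ext_iff_of_nodup (PySem.Set.nodup_ofList xs) xs.nodup_dedup).2 ?_
      intro y; rw [PySem.Set.mem_ofList, List.mem_dedup]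
    have hlen : xs.dedup.length = xs.length := by rw [← hperm.length_eq, h]
    have hself : xs.dedup = xs := xs.dedup_sublist.eq_of_length hlen
    rw [← hself]; exact xs.nodup_dedup
  · intro h; rw [PySem.Set.ofList_eq_self_of_nodup xs h]

theorem le_getLast_of_pairwise {l : List Int} (hp : l.Pairwise (· ≤ ·)) (hne : l ≠ [])
    {y : Int} (hy : y ∈ l) : y ≤ l.getLast hne := by
  induction l with
  | nil => exact absurd rfl hne
  | cons a t ih =>
    cases t with
    | nil => simp_all
    | cons b t' =>
      rcases List.mem_cons.1 hy with rfl | hy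
      · have hab : y ≤ (b :: t').getLast (by simp) :=
          (List.pairwise_cons.1 hp).1 _ (List.getLast_mem _)
        simpa [List.getLast] using hab
      · simpa [List.getLast] using ih (List.pairwise_cons.1 hp).2 (by simp) hy

theorem validate_sbox_spec : Claim_equal_validate_sbox := by
  intro sbox bit_num _
  unfold Spec_validate_sbox validate_sbox validate_sbox_alt
  by_cases hb : bit_num < 0
  · simp [hb]
  · simp only [hb, if_false]
    by_cases hlen : ((sbox.length : Int) != 2 ^ bit_num.toNat) = true
    · simp [hlen]
    · simp only [hlen, Bool.false_eq_true, if_false]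
      have hlen' : (sbox.length : Int) = 2 ^ bit_num.toNat := by
        simpa using hlen
      have hperm := PySem.List.sorted_perm sbox (fun x => x) false
      have hpw := PySem.List.sorted_pairwise sbox (fun x => x)
      cases hsm : PySem.List.sorted sbox (fun x => x) false with
      | nil =>
        rw [hsm] at hperm
        have hnil : sbox = [] := hperm.symm.eq_nil
        subst hnil
        simp [PySem.Set.ofList_nil]
      | cons h t =>
        rw [hsm] at hperm hpw
        have hh : h ∈ sbox := hperm.mem_iff.1 List.mem_cons_self
        have hlast : (h :: t).getLast (by simp) ∈ sbox :=
          hperm.mem_iff.1 (List.getLast_mem _)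
        by_cases hrange : ∀ v ∈ sbox, 0 ≤ v ∧ v ≤ 2 ^ bit_num.toNat - 1
        · have hall : (sbox.all fun val => decide (0 ≤ val) && decide (val ≤ 2 ^ (bit_num.toNat : Nat) - 1)) = true := by
            rw [List.all_eq_true]; intro v hv
            simp [(hrange v hv).1, (hrange v hv).2]
          have h0 : ¬ h < 0 := not_lt.2 (hrange h hh).1
          have hL : ¬ (h :: t).getLast (by simp) > (sbox.length : Int) - 1 := by
            have := (hrange _ hlast).2; omega
          simp only [hall, Bool.not_true, Bool.false_eq_true, if_false,
            decide_eq_false h0, decide_eq_false hL, Bool.or_self]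
          by_cases hnd : sbox.Nodup
          · have hEq : (PySem.Set.ofList sbox).length = sbox.length :=
              (length_ofList_eq_iff sbox).2 hnd
            have hpd : pairsDistinct (h :: t) = true :=
              pairsDistinct_of_nodup (hperm.nodup_iff.2 hnd)
            simp [hEq, hpd]
          · have hne : (PySem.Set.ofList sbox).length ≠ sbox.length := fun hEq =>
              hnd ((length_ofList_eq_iff sbox).1 hEq)
            have hpd : pairsDistinct (h :: t) = false := by
              cases hpdc : pairsDistinct (h :: t)
              · rfl
              · exact absurd (hperm.nodup_iff.1
                  ((pairwise_lt_of_pairsDistinct hpw hpdc).imp (fun hlt => ne_of_lt hlt))) hnd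
            simp [hne, hpd]
        · push Not at hrange
          obtain ⟨v, hv, hbad⟩ := hrange
          have hall : (sbox.all fun val => decide (0 ≤ val) && decide (val ≤ 2 ^ (bit_num.toNat : Nat) - 1)) = false := by
            rw [List.all_eq_false]
            refine ⟨v, hv, ?_⟩
            by_cases h1 : (0:Int) ≤ v
            · have := hbad h1; simp [h1]; omega
            · simp [h1]
          have hbd : (decide (h < 0) || decide ((h :: t).getLast (by simp) > (sbox.length : Int) - 1)) = true := by
            have hhle : h ≤ v := by
              simpa using PySem.List.key_head_sorted_le sbox (fun x => x) hsm v hv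
            have hvle : v ≤ (h :: t).getLast (by simp) :=
              le_getLast_of_pairwise hpw (by simp) (hperm.mem_iff.2 hv)
            by_cases h1 : (0:Int) ≤ v
            · have := hbad h1
              have : (h :: t).getLast (by simp) > (sbox.length : Int) - 1 := by omega
              simp [this]
            · have : h < 0 := by omega
              simp [this]
          simp only [hall, hbd, Bool.not_false, if_true]
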